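-- pv_equiv track=rewrite | github.com/bucs110SPRING23/portfolio-Lionel20020924 | ch05/lab/main.py | count_iterations
-- ===== SOURCE A (Python) =====
-- def three_n_plus_1(n):
--     count = 0
--     while n != 1:
--         if n % 2 == 0:
--             n = n // 2
--         else:
--             n = 3*n + 1
--         count += 1
--     return count
--
-- def count_iterations(lower_limit, upper_limit):
--     objs_in_sequence = {}
--     for i in range(lower_limit, upper_limit+1):
--         for j in range(2, i+1):
--             count = three_n_plus_1(j)
--             if count not in objs_in_sequence:
--                 objs_in_sequence[count] = []
--             objs_in_sequence[count].append(j)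
--     return objs_in_sequence
-- ===== SOURCE B (Python) =====
-- def three_n_plus_1(n):
--     count = 0
--     while n != 1:
--         if n % 2 == 0:
--             n = n // 2
--         else:
--             n = 3*n + 1
--         count += 1
--     return count
--
-- def count_iterations(lower_limit, upper_limit):
--     # step-counts computed once, as an ordered (j, count) table
--     counts = [(j, three_n_plus_1(j)) for j in range(2, upper_limit + 1)]
--     # flat stream of all (j, count) events, outer i taking the prefix j <= i
--     events = [jc for i in range(lower_limit, upper_limit + 1)
--                  for jc in counts[: max(i - 1, 0)]]
--     groups = {}
--     for j, c in events:
--         groups.setdefault(c, []).append(j)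
--     return groups
-- ===== Notes on version B (the rewrite author's own statement) =====
-- stated objective: faster
-- what changed: B computes each Collatz step-count once into an ordered (j,count) table, flattens the nested iteration into one event stream of table prefixes, and builds the dict in a single loop with setdefault, where A re-walks the Collatz chain of every j for every outer i.
import Mathlib
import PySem

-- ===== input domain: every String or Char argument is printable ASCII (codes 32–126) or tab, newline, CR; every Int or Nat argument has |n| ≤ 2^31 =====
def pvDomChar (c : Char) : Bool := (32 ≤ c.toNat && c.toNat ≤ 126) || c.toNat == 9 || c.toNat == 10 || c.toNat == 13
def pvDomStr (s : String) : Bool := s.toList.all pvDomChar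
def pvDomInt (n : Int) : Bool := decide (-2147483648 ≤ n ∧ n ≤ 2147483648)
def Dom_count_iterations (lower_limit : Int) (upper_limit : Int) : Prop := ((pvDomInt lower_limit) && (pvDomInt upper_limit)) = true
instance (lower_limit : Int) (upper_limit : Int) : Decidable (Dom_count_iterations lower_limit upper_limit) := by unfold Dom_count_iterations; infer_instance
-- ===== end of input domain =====

-- B tabulates each Collatz step-count once and flattens the nested iteration into one
-- event stream of table prefixes folded by a single dict loop; objective: faster
-- (the per-i chain recomputation disappears).

-- ===== PORT A =====
-- shared module helper three_n_plus_1: the while loop is ported with a fuel guard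
-- (Python's loop is not provably terminating for arbitrary n; 100000 steps more than cover
-- every n reached from |n| ≤ 2^31; the fuel only makes the same computation total).
def tnp1Go : Nat → Int → Int → Int
  | 0, _, count => count
  | fuel + 1, n, count =>
    if n ≠ 1 then
      tnp1Go fuel (if PySem.Int.mod n 2 = 0 then PySem.Int.floordiv n 2 else 3 * n + 1) (count + 1)
    else count

def three_n_plus_1 (n : Int) : Int := tnp1Go 100000 n 0

def count_iterations (lower_limit : Int) (upper_limit : Int) : List (Int × List Int) :=
  ((PySem.List.pyRange lower_limit (upper_limit + 1) 1).foldl (fun d i =>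
    (PySem.List.pyRange 2 (i + 1) 1).foldl (fun d j =>
      let count := three_n_plus_1 j
      let d := if d.contains count then d else d.insert count ([] : List Int)
      d.modify count [] (fun l => l ++ [j])) d)
    (PySem.Dict.empty : PySem.Dict Int (List Int))).items

-- ===== PORT B =====
def count_iterations_alt (lower_limit : Int) (upper_limit : Int) : List (Int × List Int) :=
  let counts : List (Int × Int) :=
    (PySem.List.pyRange 2 (upper_limit + 1) 1).map (fun j => (j, three_n_plus_1 j))
  let events : List (Int × Int) :=
    (PySem.List.pyRange lower_limit (upper_limit + 1) 1).flatMap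
      (fun i => PySem.List.slice counts none (some (max (i - 1) 0)))
  (events.foldl (fun d jc =>
      (d.setdefault jc.2 ([] : List Int)).modify jc.2 [] (fun l => l ++ [jc.1]))
    (PySem.Dict.empty : PySem.Dict Int (List Int))).items

-- ===== PRECONDITION & SPEC =====
def Spec_count_iterations (lower_limit : Int) (upper_limit : Int) (out : List (Int × List Int)) : Prop := out = count_iterations_alt lower_limit upper_limit
instance (lower_limit : Int) (upper_limit : Int) (out : List (Int × List Int)) : Decidable (Spec_count_iterations lower_limit upper_limit out) := by unfold Spec_count_iterations; infer_instance

-- ===== CLAIM =====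
def Claim_equal_count_iterations : Prop := ∀ (lower_limit : Int) (upper_limit : Int), Dom_count_iterations lower_limit upper_limit → Spec_count_iterations lower_limit upper_limit (count_iterations lower_limit upper_limit)

-- ===== LEMMAS AND PROOFS =====

-- folding over a flattened stream is the nested fold
theorem foldl_flatMap_eq {α β γ : Type} (l : List α) (g : α → List β)
    (f : γ → β → γ) (init : γ) :
    (l.flatMap g).foldl f init = l.foldl (fun acc x => (g x).foldl f acc) init := by
  induction l generalizing init with
  | nil => rfl
  | cons x xs ih => simp [List.flatMap_cons, List.foldl_append, ih]

-- the prefix of the (j, count) table read for outer index i (i ≤ U) is exactly j ∈ [2, i]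
theorem slice_counts_eq (upper_limit i : Int) (hi : i ≤ upper_limit) :
    PySem.List.slice ((PySem.List.pyRange 2 (upper_limit + 1) 1).map
        (fun j => (j, three_n_plus_1 j))) none (some (max (i - 1) 0)) =
      (PySem.List.pyRange 2 (i + 1) 1).map (fun j => (j, three_n_plus_1 j)) := by
  rw [PySem.List.slice_to _ (le_max_right _ _), ← List.map_take]
  congr 1
  rw [PySem.List.pyRange_one 2 (upper_limit + 1), ← List.map_take, List.take_range,
    PySem.List.pyRange_one 2 (i + 1)]
  congr 2
  omega

-- ===== VERDICT =====
theorem count_iterations_spec : Claim_equal_count_iterations := by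
  intro lower_limit upper_limit _
  unfold Spec_count_iterations count_iterations count_iterations_alt
  congr 1
  rw [foldl_flatMap_eq]
  apply PySem.List.foldl_congr_mem
  intro d i hi
  rw [PySem.List.mem_pyRange_one] at hi
  rw [slice_counts_eq upper_limit i (by omega), List.foldl_map]
  apply PySem.List.foldl_congr_mem
  intro d j _
  by_cases hc : d.contains (three_n_plus_1 j)
  · rw [PySem.Dict.setdefault_of_contains d ([] : List Int) hc]
    simp [hc]
  · simp only [Bool.not_eq_true] at hc
    rw [PySem.Dict.setdefault_of_not_contains d ([] : List Int) hc]
    simp [hc]
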